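-- pv_equiv track=rewrite | github.com/pypi-data/pypi-mirror-373 | packages/novus-pytils/novus_pytils-0.0.64-py3-none-any.whl/novus_pytils/utils/validation.py | contains_dangerous_chars
-- ===== SOURCE A (Python) =====
-- def contains_dangerous_chars(path: str) -> bool:
--     """Check if path contains dangerous characters.
--
--     Args:
--         path: Path to check
--
--     Returns:
--         bool: True if dangerous characters found
--     """
--     dangerous_chars = ['<', '>', ':', '"', '|', '?', '*']
--
--     for char in dangerous_chars:
--         if char in path:
--             return True
--
--     if any(ord(char) < 32 for char in path):
--         return True
--
--     return False
-- ===== SOURCE B (Python) =====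
-- DANGEROUS = {'<', '>', ':', '"', '|', '?', '*'}
--
-- def contains_dangerous_chars(path: str) -> bool:
--     """Check if path contains dangerous characters."""
--     return any(c in DANGEROUS or ord(c) < 32 for c in path)
-- ===== Notes on version B (the rewrite author's own statement) =====
-- stated objective: idiomatic
-- what changed: B makes one short-circuiting pass over path checking each character against a dangerous-character set and the control-code threshold, instead of A's loop over the 7 dangerous characters (each a full substring scan of path) followed by a separate any() pass.
import Mathlib
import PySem

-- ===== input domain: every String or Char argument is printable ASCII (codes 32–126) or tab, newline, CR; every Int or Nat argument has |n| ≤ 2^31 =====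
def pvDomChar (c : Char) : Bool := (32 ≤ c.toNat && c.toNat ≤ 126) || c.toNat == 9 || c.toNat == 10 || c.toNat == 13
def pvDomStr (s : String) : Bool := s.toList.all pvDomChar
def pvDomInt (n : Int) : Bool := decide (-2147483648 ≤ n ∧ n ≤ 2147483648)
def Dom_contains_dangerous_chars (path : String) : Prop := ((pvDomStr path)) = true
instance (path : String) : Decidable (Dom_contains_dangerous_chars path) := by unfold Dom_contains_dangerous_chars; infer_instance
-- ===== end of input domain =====

-- B replaces A's loop over the 7 dangerous characters (each a full scan of path)
-- plus a separate any() pass by one short-circuiting pass over path (idiomatic).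


-- ===== PORT A =====
-- A's outer loop over dangerous_chars, early-returning when `char in path`
def pvA_loop (path : List Char) : List Char → Bool
  | [] => false
  | c :: rest => if path.contains c then true else pvA_loop path rest

def contains_dangerous_chars (path : String) : Bool :=
  let dangerous_chars : List Char := ['<', '>', ':', '"', '|', '?', '*']
  if pvA_loop path.toList dangerous_chars then true
  else if path.toList.any (fun c => decide (c.toNat < 32)) then true
  else false

-- ===== PORT B =====
def pvDANGEROUS : PySem.Set Char := PySem.Set.ofList ['<', '>', ':', '"', '|', '?', '*']

def contains_dangerous_chars_alt (path : String) : Bool :=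
  path.toList.any (fun c => pvDANGEROUS.contains c || decide (c.toNat < 32))

-- ===== PRECONDITION & SPEC =====
def Spec_contains_dangerous_chars (path : String) (out : Bool) : Prop := out = contains_dangerous_chars_alt path
instance (path : String) (out : Bool) : Decidable (Spec_contains_dangerous_chars path out) := by unfold Spec_contains_dangerous_chars; infer_instance

-- ===== CLAIM (what is proved, stated in full; the proofs are below) =====
def Claim_equal_contains_dangerous_chars : Prop := ∀ (path : String), Dom_contains_dangerous_chars path → Spec_contains_dangerous_chars path (contains_dangerous_chars path)

-- ===== LEMMAS AND PROOFS =====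

-- A's outer loop is an `any` over the dangerous-char list
theorem pvA_loop_eq (path : List Char) (ds : List Char) :
    pvA_loop path ds = ds.any (fun c => path.contains c) := by
  induction ds with
  | nil => rfl
  | cons c rest ih =>
    simp only [pvA_loop, List.any_cons, ih]
    by_cases h : path.contains c <;> simp [h]

-- swapping the two quantifiers: scan ds over path ↔ scan path over ds
theorem pvSwap (p ds : List Char) :
    ds.any (fun d => p.contains d) = p.any (fun c => ds.contains c) := by
  rw [Bool.eq_iff_iff]
  simp only [List.any_eq_true, List.contains_iff_mem]
  exact ⟨fun ⟨d, hd, hp⟩ => ⟨d, hp, hd⟩, fun ⟨c, hc, hds⟩ => ⟨c, hds, hc⟩⟩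

-- B's single pass splits into two passes
theorem pvSplit (p : List Char) (ds : List Char) :
    p.any (fun c => ds.contains c || decide (c.toNat < 32)) =
      (p.any (fun c => ds.contains c) || p.any (fun c => decide (c.toNat < 32))) := by
  induction p with
  | nil => simp
  | cons c cs ih =>
    simp only [List.any_cons, ih]
    cases ds.contains c <;> cases decide (c.toNat < 32) <;>
      cases cs.any (fun c => ds.contains c) <;> cases cs.any (fun c => decide (c.toNat < 32)) <;> simp

-- ===== VERDICT (by name: the statement is the Claim_ definition above) =====
theorem contains_dangerous_chars_spec : Claim_equal_contains_dangerous_chars := by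
  intro path _
  unfold Spec_contains_dangerous_chars contains_dangerous_chars contains_dangerous_chars_alt
  simp only [pvA_loop_eq, pvSwap]
  rw [show (pvDANGEROUS : List Char) = ['<', '>', ':', '"', '|', '?', '*'] from by decide]
  simp only [show ∀ (s : PySem.Set Char) (c:Char), PySem.Set.contains s c = List.contains s c from fun s c => by simp [PySem.Set.contains]]
  rw [pvSplit]
  cases path.toList.any (fun c => (['<', '>', ':', '"', '|', '?', '*'] : List Char).contains c) <;>
    cases path.toList.any (fun c => decide (c.toNat < 32)) <;> simp
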